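-- pv_equiv track=rewrite | github.com/gabrielceh/aprendiendo-python-intermedio | retos/03_high_order_func.py | get_last_ten_countries
-- ===== SOURCE A (Python) =====
-- def get_last_ten_countries(countries:list):
-- 	my_ten_last_items = []
-- 	countries_copy = countries.copy()
-- 	countries_copy.reverse()
-- 	for (i, item) in enumerate(countries_copy):
-- 		if i >= 10:
-- 			break
-- 		my_ten_last_items.append(item)
--
-- 	my_ten_last_items.reverse()
--
-- 	return my_ten_last_items
-- ===== SOURCE B (Python) =====
-- def get_last_ten_countries(countries: list):
--     return countries[-10:]
-- ===== Notes on version B (the rewrite author's own statement) =====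
-- stated objective: idiomatic
-- what changed: Replaced the reverse/enumerate/break loop and second reverse with the single closed-form negative slice countries[-10:].
import Mathlib
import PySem

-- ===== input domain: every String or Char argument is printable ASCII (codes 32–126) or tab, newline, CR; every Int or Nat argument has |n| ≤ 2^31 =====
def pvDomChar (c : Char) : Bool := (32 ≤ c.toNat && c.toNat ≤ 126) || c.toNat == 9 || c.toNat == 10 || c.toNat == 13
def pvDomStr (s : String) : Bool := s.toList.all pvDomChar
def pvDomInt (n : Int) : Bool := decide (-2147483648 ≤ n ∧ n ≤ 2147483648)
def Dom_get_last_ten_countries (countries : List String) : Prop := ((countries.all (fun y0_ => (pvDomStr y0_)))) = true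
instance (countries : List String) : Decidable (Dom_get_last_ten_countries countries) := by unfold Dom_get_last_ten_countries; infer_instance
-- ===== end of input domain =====

-- ===== PORT A =====
-- B replaces A's reverse/enumerate loop with the closed-form slice countries[-10:] (idiomatic).
-- loop over enumerate(countries_copy) with 'break' at i >= 10, appending to my_ten_last_items
def getLastTenLoop (i : Nat) (acc : List String) : List String → List String
  | [] => acc
  | item :: rest =>
      if i ≥ 10 then acc
      else getLastTenLoop (i + 1) (acc ++ [item]) rest

def get_last_ten_countries (countries : List String) : List String :=
  let my_ten_last_items : List String := []
  let countries_copy := countries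
  let countries_copy := countries_copy.reverse
  let my_ten_last_items := getLastTenLoop 0 my_ten_last_items countries_copy
  my_ten_last_items.reverse

-- ===== PORT B =====
def get_last_ten_countries_alt (countries : List String) : List String :=
  PySem.List.slice countries (some (-10)) none

-- ===== PRECONDITION & SPEC =====
def Spec_get_last_ten_countries (countries : List String) (out : List String) : Prop := out = get_last_ten_countries_alt countries
instance (countries : List String) (out : List String) : Decidable (Spec_get_last_ten_countries countries out) := by unfold Spec_get_last_ten_countries; infer_instance

-- ===== CLAIM (what is proved, stated in full; the proofs are below) =====
def Claim_equal_get_last_ten_countries : Prop := ∀ (countries : List String), Dom_get_last_ten_countries countries → Spec_get_last_ten_countries countries (get_last_ten_countries countries)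

-- ===== LEMMAS AND PROOFS =====

-- ===== VERDICT (by name: the statement is the Claim_ definition above) =====
theorem getLastTenLoop_eq (xs : List String) : ∀ (i : Nat) (acc : List String),
    getLastTenLoop i acc xs = acc ++ xs.take (10 - i) := by
  induction xs with
  | nil => intro i acc; simp [getLastTenLoop]
  | cons x xs ih =>
      intro i acc
      by_cases h : i ≥ 10
      · have : 10 - i = 0 := by omega
        simp [getLastTenLoop, h, this]
      · have h10 : 10 - i = (10 - (i + 1)) + 1 := by omega
        simp [getLastTenLoop, h, ih, h10]

theorem get_last_ten_countries_spec : Claim_equal_get_last_ten_countries := by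
  intro countries _
  unfold Spec_get_last_ten_countries get_last_ten_countries get_last_ten_countries_alt
  rw [PySem.List.slice_from_neg_ofNat countries 10 (by omega)]
  simp [getLastTenLoop_eq, List.take_reverse]
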